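-- pv_equiv track=rewrite | github.com/Helsinki-NLP/OPUS-translator | language_util.py | add_languages
-- ===== SOURCE A (Python) =====
-- def add_languages(src_langs, tgt_langs, srcs_str, tgts_str):
--     """Add language directions lists"""
--
--     for sl in srcs_str.split():
--         for tl in tgts_str.split():
--             if sl != tl:
--                 if sl not in src_langs:
--                     src_langs.append(sl)
--                     tgt_langs.append([tl])
--                 else:
--                     tgt_langs[src_langs.index(sl)].append(tl)
--     return src_langs, tgt_langs
-- ===== SOURCE B (Python) =====
-- def add_languages(src_langs, tgt_langs, srcs_str, tgts_str):
--     """Add language directions lists"""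
--
--     # pass 1: group, per source token, all its non-equal target tokens in order
--     grouped = {}
--     tgts = tgts_str.split()
--     for sl in srcs_str.split():
--         for tl in tgts:
--             if tl != sl:
--                 grouped[sl] = grouped.get(sl, []) + [tl]
--     # seed: first position of each language already present
--     pos = {}
--     for i, s in enumerate(src_langs):
--         if s not in pos:
--             pos[s] = i
--     # pass 2: merge the grouped table into the parallel lists (mutated in place)
--     for sl, tls in grouped.items():
--         if sl in pos:
--             tgt_langs[pos[sl]].extend(tls)
--         else:
--             src_langs.append(sl)
--             tgt_langs.append(tls)
--     return src_langs, tgt_langs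
-- ===== Notes on version B (the rewrite author's own statement) =====
-- stated objective: alternative
-- what changed: Replaces A's interleaved nested loop (append-or-index-scan per (src,tgt) token pair) by a group-then-merge shape: one pass builds an ordered table mapping each source token to all its non-equal targets, a seeded first-index map replaces repeated list.index scans, and a second pass merges the table into the parallel lists in place.
-- outside the precondition, e.g. on add_languages(['a', 'b'], [['x']], 'b', 'y'): A raises IndexError, B raises IndexError
import Mathlib
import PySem

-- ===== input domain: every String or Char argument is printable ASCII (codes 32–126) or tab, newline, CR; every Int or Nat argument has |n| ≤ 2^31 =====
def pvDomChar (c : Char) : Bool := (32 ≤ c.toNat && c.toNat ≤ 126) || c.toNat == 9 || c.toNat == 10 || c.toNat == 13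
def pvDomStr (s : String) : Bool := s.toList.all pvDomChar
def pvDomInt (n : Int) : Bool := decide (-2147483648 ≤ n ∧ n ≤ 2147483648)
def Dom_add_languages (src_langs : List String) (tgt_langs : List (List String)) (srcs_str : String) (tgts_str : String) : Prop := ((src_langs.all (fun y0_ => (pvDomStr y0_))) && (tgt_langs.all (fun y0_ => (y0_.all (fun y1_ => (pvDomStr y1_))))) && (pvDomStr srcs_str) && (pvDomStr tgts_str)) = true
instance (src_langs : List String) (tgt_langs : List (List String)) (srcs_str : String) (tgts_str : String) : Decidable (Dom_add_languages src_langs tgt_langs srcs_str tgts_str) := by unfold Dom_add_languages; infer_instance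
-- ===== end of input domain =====

-- ===== PORT A =====
-- B replaces A's interleaved nested loop by a group-then-merge two-pass shape (alternative
-- decomposition, same results); both Pythons mutate src_langs/tgt_langs in place the same way,
-- the equivalence proved here is about the returned pair.
def add_languages (src_langs : List String) (tgt_langs : List (List String)) (srcs_str : String) (tgts_str : String) : List String × List (List String) :=
  (PySem.Str.split₀ srcs_str).foldl (fun st sl =>
    (PySem.Str.split₀ tgts_str).foldl (fun st tl =>
      if sl ≠ tl then
        if !st.1.contains sl then
          (st.1 ++ [sl], st.2 ++ [[tl]])
        else
          -- tgt_langs[src_langs.index(sl)].append(tl); Pre_ keeps the index in range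
          let i := (PySem.List.index? st.1 sl).getD 0
          (st.1, st.2.set i (st.2.getD i [] ++ [tl]))
      else st) st)
    (src_langs, tgt_langs)

-- ===== PORT B =====
def add_languages_alt (src_langs : List String) (tgt_langs : List (List String)) (srcs_str : String) (tgts_str : String) : List String × List (List String) :=
  -- pass 1: grouped[sl] = all target tokens != sl, in encounter order
  let tgts := PySem.Str.split₀ tgts_str
  let grouped : PySem.Dict String (List String) :=
    (PySem.Str.split₀ srcs_str).foldl (fun d sl =>
      tgts.foldl (fun d tl => if tl ≠ sl then d.insert sl (d.getD sl [] ++ [tl]) else d) d)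
      PySem.Dict.empty
  -- seed: first position of each language already present
  let pos : PySem.Dict String Int :=
    (PySem.List.enumerate src_langs).foldl (fun d p =>
      if d.contains p.2 then d else d.insert p.2 p.1) PySem.Dict.empty
  -- pass 2: merge the grouped table into the parallel lists
  grouped.items.foldl (fun st p =>
    match pos.get? p.1 with
    | some i => (st.1, st.2.set i.toNat (st.2.getD i.toNat [] ++ p.2))
    | none => (st.1 ++ [p.1], st.2 ++ [p.2])) (src_langs, tgt_langs)

-- ===== PRECONDITION & SPEC =====
-- Pre_ excludes inputs where the two parallel lists have mismatched lengths AND some source token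
-- indexes or re-writes a target slot (an already-present source whose position falls outside
-- tgt_langs, or a repeated / multi-target new source): the lists are parallel (i-th target list
-- belongs to the i-th source) by the function's design, and on such inputs A either raises
-- IndexError or accidentally appends targets into whatever sublist sits at the source's index —
-- a slot-misaligned value B does not reproduce.
def Pre_add_languages (src_langs : List String) (tgt_langs : List (List String)) (srcs_str : String) (tgts_str : String) : Prop :=
  src_langs.length = tgt_langs.length ∨
  ∀ sl ∈ PySem.Str.split₀ srcs_str,
    (PySem.Str.split₀ tgts_str).filter (fun tl => decide (tl ≠ sl)) = [] ∨
    (sl ∈ src_langs ∧ ∀ i : Nat, PySem.List.index? src_langs sl = some i → i < tgt_langs.length) ∨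
    (sl ∉ src_langs ∧ (PySem.Str.split₀ srcs_str).count sl = 1 ∧
      ((PySem.Str.split₀ tgts_str).filter (fun tl => decide (tl ≠ sl))).length = 1)
instance (src_langs : List String) (tgt_langs : List (List String)) (srcs_str : String) (tgts_str : String) : Decidable (Pre_add_languages src_langs tgt_langs srcs_str tgts_str) := by unfold Pre_add_languages; infer_instance

def pvWitness_add_languages : List String × List (List String) × String × String :=
  (["en"], [["de"]], "en fr en", "de sv")

def Spec_add_languages (src_langs : List String) (tgt_langs : List (List String)) (srcs_str : String) (tgts_str : String) (out : List String × List (List String)) : Prop := out = add_languages_alt src_langs tgt_langs srcs_str tgts_str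
instance (src_langs : List String) (tgt_langs : List (List String)) (srcs_str : String) (tgts_str : String) (out : List String × List (List String)) : Decidable (Spec_add_languages src_langs tgt_langs srcs_str tgts_str out) := by unfold Spec_add_languages; infer_instance

-- ===== CLAIM (what is proved, stated in full; the proofs are below) =====
def Claim_equal_add_languages : Prop := ∀ (src_langs : List String) (tgt_langs : List (List String)) (srcs_str : String) (tgts_str : String), Dom_add_languages src_langs tgt_langs srcs_str tgts_str → Pre_add_languages src_langs tgt_langs srcs_str tgts_str → Spec_add_languages src_langs tgt_langs srcs_str tgts_str (add_languages src_langs tgt_langs srcs_str tgts_str)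

-- ===== LEMMAS AND PROOFS =====

-- A's outer-loop body (one source token, the whole inner loop), as a named function
def pvAstep (T : List String) (st : List String × List (List String)) (sl : String) : List String × List (List String) :=
  T.foldl (fun st tl =>
    if sl ≠ tl then
      if !st.1.contains sl then
        (st.1 ++ [sl], st.2 ++ [[tl]])
      else
        let i := (PySem.List.index? st.1 sl).getD 0
        (st.1, st.2.set i (st.2.getD i [] ++ [tl]))
    else st) st

-- B's grouping step for one source token
def pvGstep (T : List String) (d : PySem.Dict String (List String)) (sl : String) : PySem.Dict String (List String) :=
  T.foldl (fun d tl => if tl ≠ sl then d.insert sl (d.getD sl [] ++ [tl]) else d) d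

-- B's seeded first-position dict
def pvPos (ss : List String) : PySem.Dict String Int :=
  (PySem.List.enumerate ss).foldl (fun d p =>
    if d.contains p.2 then d else d.insert p.2 p.1) PySem.Dict.empty

-- B's merge step
def pvMstep (pos : PySem.Dict String Int) (st : List String × List (List String)) (p : String × List String) : List String × List (List String) :=
  match pos.get? p.1 with
  | some i => (st.1, st.2.set i.toNat (st.2.getD i.toNat [] ++ p.2))
  | none => (st.1 ++ [p.1], st.2 ++ [p.2])

-- the non-equal targets of one source token
def pvV (T : List String) (sl : String) : List String := T.filter (fun tl => decide (tl ≠ sl))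

-- first value stored under key k in an items list ([] if absent)
def pvGet (L : List (String × List String)) (k : String) : List String :=
  ((L.find? (fun p => p.1 == k)).map Prod.snd).getD []

-- keys of L that are not already in ss0, in order
def pvNewKeys (ss0 : List String) (L : List (String × List String)) : List String :=
  (L.map Prod.fst).filter (fun k => !ss0.contains k)

-- original target sublists, each extended by its source's grouped targets (first-occurrence slots only)
def pvUpd (ss0 : List String) (ts0 : List (List String)) (L : List (String × List String)) : List (List String) :=
  ts0.mapIdx (fun i v => v ++ (if PySem.List.index? ss0 (ss0.getD i "") = some i then pvGet L (ss0.getD i "") else []))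

-- the common closed form of both programs' result
def pvPhi (ss0 : List String) (ts0 : List (List String)) (L : List (String × List String)) : List String × List (List String) :=
  (ss0 ++ pvNewKeys ss0 L, pvUpd ss0 ts0 L ++ (pvNewKeys ss0 L).map (pvGet L))

-- Dict.insert on the items level
def pvIns (L : List (String × List String)) (k : String) (w : List String) : List (String × List String) :=
  if (L.map Prod.fst).contains k then L.map (fun p => if p.1 == k then (k, w) else p) else L ++ [(k, w)]

lemma pv_index?_append_right {α : Type} [BEq α] [LawfulBEq α] (xs t : List α) (v : α) (h : v ∉ xs) :
    PySem.List.index? (xs ++ t) v = (PySem.List.index? t v).map (· + xs.length) := by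
  induction xs with
  | nil => simp
  | cons x xs ih =>
    have hx : x ≠ v := by rintro rfl; simp at h
    rw [List.cons_append, PySem.List.index?_cons_of_ne _ hx, ih (by simp_all)]
    simp [Option.map_map]

lemma pv_items_insert_eq_pvIns (G : PySem.Dict String (List String)) (k : String) (w : List String) :
    (G.insert k w).items = pvIns G.items k w := by
  by_cases h : G.contains k = true
  · rw [PySem.Dict.items_insert_of_contains _ _ h, pvIns, if_pos]
    simpa [PySem.Dict.contains, List.any_eq_true] using h
  · rw [PySem.Dict.items_insert_of_not_contains _ _ (by simpa using h), pvIns, if_neg]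
    simpa [PySem.Dict.contains, List.any_eq_true] using h

lemma pv_dict_getD_eq_pvGet (G : PySem.Dict String (List String)) (k : String) :
    G.getD k [] = pvGet G.items k := rfl

lemma pvGet_nil_of_not_mem (L : List (String × List String)) (k : String) (h : k ∉ L.map Prod.fst) :
    pvGet L k = [] := by
  have : L.find? (fun p => p.1 == k) = none := by
    rw [List.find?_eq_none]; intro p hp; simp; rintro rfl; exact h (List.mem_map.2 ⟨p, hp, rfl⟩)
  simp [pvGet, this]

lemma pvGet_append_single_of_ne (L : List (String × List String)) (k k' : String) (w : List String) (h : k' ≠ k) :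
    pvGet (L ++ [(k, w)]) k' = pvGet L k' := by
  simp [pvGet, List.find?_append]
  cases hf : L.find? (fun p => p.1 == k') <;> simp [Ne.symm h]

lemma pvGet_append_single_self (L : List (String × List String)) (k : String) (w : List String) (h : k ∉ L.map Prod.fst) :
    pvGet (L ++ [(k, w)]) k = w := by
  have : L.find? (fun p => p.1 == k) = none := by
    rw [List.find?_eq_none]; intro p hp; simp; rintro rfl; exact h (List.mem_map.2 ⟨p, hp, rfl⟩)
  simp [pvGet, List.find?_append, this]

lemma pvGet_updf_ne (L : List (String × List String)) (k k' : String) (w : List String) (h : k' ≠ k) :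
    pvGet (L.map (fun p => if p.1 == k then (k, w) else p)) k' = pvGet L k' := by
  induction L with
  | nil => rfl
  | cons p L ih =>
    simp only [List.map_cons]
    unfold pvGet
    rw [List.find?_cons, List.find?_cons]
    have h1 : (((if p.1 == k then (k, w) else p) : String × List String).1 == k') = (p.1 == k') := by
      by_cases hp : p.1 = k <;> simp [hp, Ne.symm h]
    rw [h1]
    by_cases hpk : (p.1 == k') = true
    · have hpk' : p.1 ≠ k := by have := of_decide_eq_true hpk; simp_all
      simp [hpk, hpk']
    · rw [Bool.not_eq_true] at hpk
      simp only [hpk]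
      exact ih

lemma pvGet_updf_self (L : List (String × List String)) (k : String) (w : List String) (h : k ∈ L.map Prod.fst) :
    pvGet (L.map (fun p => if p.1 == k then (k, w) else p)) k = w := by
  induction L with
  | nil => simp at h
  | cons p L ih =>
    simp only [List.map_cons]
    unfold pvGet
    rw [List.find?_cons]
    by_cases hp : p.1 = k
    · simp [hp]
    · have hh : k ∈ p.1 :: L.map Prod.fst := h
      have h' : k ∈ L.map Prod.fst := by
        rcases List.mem_cons.1 hh with h0 | h0
        · exact absurd h0.symm hp
        · exact h0
      have h1 : (((if p.1 == k then (k, w) else p) : String × List String).1 == k) = false := by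
        simp [hp]
      rw [h1]
      exact ih h'

lemma pv_map_fst_updf (L : List (String × List String)) (k : String) (w : List String) :
    (L.map (fun p => if p.1 == k then (k, w) else p)).map Prod.fst = L.map Prod.fst := by
  rw [List.map_map]; apply List.map_congr_left; intro p _hp
  by_cases hp : p.1 = k <;> simp [hp]

lemma pv_mapIdx_congr {α β : Type} (l : List α) (f g : Nat → α → β)
    (h : ∀ (i : Nat) (hi : i < l.length), f i l[i] = g i l[i]) : l.mapIdx f = l.mapIdx g := by
  apply List.ext_getElem (by simp)
  intro i h1 h2
  simpa using h i (by simpa using h1)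

lemma pv_mapIdx_id {α : Type} (l : List α) : l.mapIdx (fun _ v => v) = l := by
  apply List.ext_getElem (by simp)
  intro i h1 h2
  simp

-- uniform facts about pvIns L k (pvGet L k ++ V)
lemma pv_ins_get_self (L : List (String × List String)) (k : String) (w : List String) :
    pvGet (pvIns L k w) k = w := by
  rw [pvIns]
  by_cases hm : (L.map Prod.fst).contains k = true
  · rw [if_pos hm]; exact pvGet_updf_self _ _ _ (by simpa using hm)
  · rw [if_neg hm]; exact pvGet_append_single_self _ _ _ (by simpa using hm)

lemma pv_ins_get_ne (L : List (String × List String)) (k k' : String) (w : List String) (h : k' ≠ k) :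
    pvGet (pvIns L k w) k' = pvGet L k' := by
  rw [pvIns]
  by_cases hm : (L.map Prod.fst).contains k = true
  · rw [if_pos hm]; exact pvGet_updf_ne _ _ _ _ h
  · rw [if_neg hm]; exact pvGet_append_single_of_ne _ _ _ _ h

lemma pv_ins_newKeys_of_mem (ss0 : List String) (L : List (String × List String)) (k : String)
    (w : List String) (hk : k ∈ ss0) :
    pvNewKeys ss0 (pvIns L k w) = pvNewKeys ss0 L := by
  rw [pvIns]
  by_cases hm : (L.map Prod.fst).contains k = true
  · rw [if_pos hm, pvNewKeys, pvNewKeys, pv_map_fst_updf]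
  · rw [if_neg hm, pvNewKeys, pvNewKeys]
    simp [List.filter_append, hk]

lemma pv_upd_length (ss0 : List String) (ts0 : List (List String)) (L : List (String × List String)) :
    (pvUpd ss0 ts0 L).length = ts0.length := by simp [pvUpd]

lemma pv_upd_getElem (ss0 : List String) (ts0 : List (List String)) (L : List (String × List String))
    (j : Nat) (hj : j < ts0.length) :
    (pvUpd ss0 ts0 L)[j]'(by simpa [pvUpd] using hj)
      = ts0[j] ++ (if PySem.List.index? ss0 (ss0.getD j "") = some j then pvGet L (ss0.getD j "") else []) := by
  simp [pvUpd]

lemma pv_upd_ins_of_ne (ss0 : List String) (ts0 : List (List String)) (L : List (String × List String))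
    (k : String) (w : List String)
    (h : ∀ j : Nat, PySem.List.index? ss0 (ss0.getD j "") = some j → ss0.getD j "" ≠ k) :
    pvUpd ss0 ts0 (pvIns L k w) = pvUpd ss0 ts0 L := by
  rw [pvUpd, pvUpd]
  apply pv_mapIdx_congr
  intro i hi
  by_cases hcond : PySem.List.index? ss0 (ss0.getD i "") = some i
  · rw [if_pos hcond, if_pos hcond, pv_ins_get_ne _ _ _ _ (h i hcond)]
  · rw [if_neg hcond, if_neg hcond]

lemma pv_pos_get_aux (s : String) (ss : List String) : ∀ (d : PySem.Dict String Int) (k : Int),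
    ((PySem.List.enumerate ss k).foldl (fun d p => if d.contains p.2 then d else d.insert p.2 p.1) d).get? s
      = (d.get? s).orElse (fun _ => (PySem.List.index? ss s).map (fun n => (n : Int) + k)) := by
  induction ss with
  | nil => intro d k; cases h : d.get? s <;> simp [PySem.List.enumerate, Option.orElse, h]
  | cons x ss ih =>
    intro d k
    rw [PySem.List.enumerate_cons, List.foldl_cons]
    by_cases hx : x = s
    · subst hx
      rw [PySem.List.index?_cons_self]
      by_cases hc : d.contains x = true
      · rw [if_pos hc, ih]
        rcases h : d.get? x with _ | v
        · rw [PySem.Dict.get?_eq_none_iff_contains] at h; simp [h] at hc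
        · simp [h, Option.orElse]
      · rw [if_neg hc, ih]
        have hd : d.get? x = none := (PySem.Dict.get?_eq_none_iff_contains d x).2 (by simpa using hc)
        simp [hd, PySem.Dict.get?_insert_self, Option.orElse]
    · rw [PySem.List.index?_cons_of_ne _ hx]
      by_cases hc : d.contains x = true
      · rw [if_pos hc, ih]
        rcases hr : PySem.List.index? ss s with _ | n <;>
          rcases h : d.get? s with _ | v <;>
            simp [hr, h, Option.orElse] <;> push_cast <;> ring
      · rw [if_neg hc, ih, PySem.Dict.get?_insert_of_ne _ _ (Ne.symm hx)]
        rcases hr : PySem.List.index? ss s with _ | n <;>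
          rcases h : d.get? s with _ | v <;>
            simp [hr, h, Option.orElse] <;> push_cast <;> ring


lemma pv_pos_get (ss : List String) (s : String) :
    (pvPos ss).get? s = (PySem.List.index? ss s).map (fun n => (n : Int)) := by
  rw [pvPos, pv_pos_get_aux]
  simp [PySem.Dict.get?_empty, Option.orElse]


lemma pv_gstep_ext (sl : String) : ∀ (w : List String) (d : PySem.Dict String (List String)), w ≠ [] →
    w.foldl (fun d tl => d.insert sl (d.getD sl [] ++ [tl])) d = d.insert sl (d.getD sl [] ++ w) := by
  intro w
  induction w with
  | nil => intro d h; simp at h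
  | cons a w ih =>
    intro d _
    rw [List.foldl_cons]
    rcases eq_or_ne w [] with rfl | hw
    · simp
    · rw [ih _ hw]
      rw [PySem.Dict.insert_insert_self]
      have : (d.insert sl (d.getD sl [] ++ [a])).getD sl [] = d.getD sl [] ++ [a] := by
        simp [PySem.Dict.getD, PySem.Dict.get?_insert_self]
      rw [this, List.append_assoc]
      rfl


lemma pv_gstep_eq (T : List String) (d : PySem.Dict String (List String)) (sl : String) :
    pvGstep T d sl = if pvV T sl = [] then d else d.insert sl (d.getD sl [] ++ pvV T sl) := by
  have hfil := PySem.List.foldl_ite_eq_foldl_filter (p := fun tl : String => tl ≠ sl)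
      (f := fun (d : PySem.Dict String (List String)) tl => d.insert sl (d.getD sl [] ++ [tl])) T d
  rw [pvGstep, hfil]
  rcases eq_or_ne (pvV T sl) [] with h | h
  · rw [pvV] at h ⊢; rw [h, if_pos rfl]; simp
  · rw [if_neg (by exact h)]
    exact pv_gstep_ext sl _ d h


lemma pv_G_keys_nodup (T : List String) : ∀ (S : List String) (d : PySem.Dict String (List String)),
    d.keys.Nodup → (S.foldl (pvGstep T) d).keys.Nodup := by
  intro S
  induction S with
  | nil => intro d h; exact h
  | cons sl S ih =>
    intro d h
    rw [List.foldl_cons]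
    apply ih
    rw [pv_gstep_eq]
    split
    · exact h
    · exact PySem.Dict.nodup_keys_insert _ _ _ h


lemma pv_A_extend (sl : String) : ∀ (w : List String) (ss : List String) (ts : List (List String)),
    sl ∈ ss → (PySem.List.index? ss sl).getD 0 < ts.length →
    w.foldl (fun st tl =>
        if !st.1.contains sl then
          (st.1 ++ [sl], st.2 ++ [[tl]])
        else
          let i := (PySem.List.index? st.1 sl).getD 0
          (st.1, st.2.set i (st.2.getD i [] ++ [tl]))) (ss, ts)
      = (ss, ts.set ((PySem.List.index? ss sl).getD 0) (ts.getD ((PySem.List.index? ss sl).getD 0) [] ++ w)) := by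
  intro w
  induction w with
  | nil =>
    intro ss ts hm hi
    simp only [List.foldl_nil, List.append_nil]
    rw [List.getD_eq_getElem _ _ hi, List.set_getElem_self hi]
  | cons a w ih =>
    intro ss ts hm hi
    rw [List.foldl_cons]
    have hc : ss.contains sl = true := by simpa using hm
    simp only [hc, Bool.not_true, Bool.false_eq_true, if_false]
    rw [ih ss _ hm (by simpa using hi)]
    have hset : ((ts.set ((PySem.List.index? ss sl).getD 0) (ts.getD ((PySem.List.index? ss sl).getD 0) [] ++ [a])).getD ((PySem.List.index? ss sl).getD 0) [])
        = ts.getD ((PySem.List.index? ss sl).getD 0) [] ++ [a] := by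
      rw [List.getD, List.getElem?_set_self']
      have hi' : (List.idxOf? sl ss).getD 0 < ts.length := by simpa using hi
      simp [List.getElem?_eq_getElem hi']
    rw [hset, List.set_set, List.append_assoc]
    rfl


lemma pv_Astep_filter (T : List String) (st : List String × List (List String)) (sl : String) :
    pvAstep T st sl = (pvV T sl).foldl (fun st tl =>
        if !st.1.contains sl then
          (st.1 ++ [sl], st.2 ++ [[tl]])
        else
          let i := (PySem.List.index? st.1 sl).getD 0
          (st.1, st.2.set i (st.2.getD i [] ++ [tl]))) st := by
  obtain ⟨ss, ts⟩ := st
  have hfil := PySem.List.foldl_ite_eq_foldl_filter (p := fun tl : String => sl ≠ tl)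
      (f := fun (st : List String × List (List String)) tl =>
        if !st.1.contains sl then
          (st.1 ++ [sl], st.2 ++ [[tl]])
        else
          let i := (PySem.List.index? st.1 sl).getD 0
          (st.1, st.2.set i (st.2.getD i [] ++ [tl]))) T (ss, ts)
  have hVeq : T.filter (fun tl => decide (sl ≠ tl)) = pvV T sl := by
    rw [pvV]; apply List.filter_congr; intro x _; simp [ne_comm]
  rw [pvAstep, hfil, hVeq]

-- A's inner loop when the source token contributes nothing
lemma pv_Astep_noop (T : List String) (st : List String × List (List String)) (sl : String)
    (hV : pvV T sl = []) : pvAstep T st sl = st := by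
  rw [pv_Astep_filter, hV, List.foldl_nil]

-- A's inner loop when the source token is already present (its slot must be in range)
lemma pv_Astep_mem (T : List String) (st : List String × List (List String)) (sl : String)
    (hc : st.1.contains sl = true)
    (hbd : (PySem.List.index? st.1 sl).getD 0 < st.2.length)
    (hV : pvV T sl ≠ []) :
    pvAstep T st sl
      = (st.1, st.2.set ((PySem.List.index? st.1 sl).getD 0) (st.2.getD ((PySem.List.index? st.1 sl).getD 0) [] ++ pvV T sl)) := by
  obtain ⟨ss, ts⟩ := st
  simp only at hc hbd
  rw [pv_Astep_filter]
  rcases hVl : pvV T sl with _ | ⟨v, w⟩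
  · exact absurd hVl hV
  · rw [List.foldl_cons]
    have hm : sl ∈ ss := by simpa using hc
    simp only [hc, Bool.not_true, Bool.false_eq_true, if_false]
    rw [pv_A_extend sl w ss _ hm (by simpa using hbd)]
    have hget : ((ts.set ((PySem.List.index? ss sl).getD 0) (ts.getD ((PySem.List.index? ss sl).getD 0) [] ++ [v])).getD ((PySem.List.index? ss sl).getD 0) [])
        = ts.getD ((PySem.List.index? ss sl).getD 0) [] ++ [v] := by
      rw [List.getD, List.getElem?_set_self']
      have hi' : (List.idxOf? sl ss).getD 0 < ts.length := by simpa using hbd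
      simp [List.getElem?_eq_getElem hi']
    rw [hget, List.set_set, List.append_assoc]
    simp

-- A's inner loop when the source token is new, on a state with parallel lists of equal length
lemma pv_Astep_new (T : List String) (st : List String × List (List String)) (sl : String)
    (h : st.1.length = st.2.length) (hc : st.1.contains sl = false) (hV : pvV T sl ≠ []) :
    pvAstep T st sl = (st.1 ++ [sl], st.2 ++ [pvV T sl]) := by
  obtain ⟨ss, ts⟩ := st
  simp only at h hc
  rw [pv_Astep_filter]
  rcases hVl : pvV T sl with _ | ⟨v, w⟩
  · exact absurd hVl hV
  · rw [List.foldl_cons]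
    have hnm : sl ∉ ss := by simpa using hc
    simp only [hc, Bool.not_false, if_true]
    have hm' : sl ∈ ss ++ [sl] := by simp
    have hidx' : PySem.List.index? (ss ++ [sl]) sl = some ss.length :=
      PySem.List.index?_append_singleton_self ss sl hnm
    have hilt' : (PySem.List.index? (ss ++ [sl]) sl).getD 0 < (ts ++ [[v]]).length := by
      rw [hidx']; simp [h]
    rw [pv_A_extend sl w (ss ++ [sl]) (ts ++ [[v]]) hm' hilt']
    rw [hidx']
    simp only [Option.getD_some]
    have hgd : (ts ++ [[v]]).getD ss.length [] = [v] := by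
      rw [h]; simp [List.getD]
    have hst : (ts ++ [[v]]).set ss.length ([v] ++ w) = ts ++ [[v] ++ w] := by
      rw [h, List.set_append_right _ _ (le_refl _)]; simp
    rw [hgd, hst]
    simp

-- A's inner loop when the source token is new and has exactly one target (no length needed)
lemma pv_Astep_single (T : List String) (st : List String × List (List String)) (sl v : String)
    (hc : st.1.contains sl = false) (hV : pvV T sl = [v]) :
    pvAstep T st sl = (st.1 ++ [sl], st.2 ++ [[v]]) := by
  obtain ⟨ss, ts⟩ := st
  simp only at hc
  rw [pv_Astep_filter, hV, List.foldl_cons, List.foldl_nil]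
  simp only [hc, Bool.not_false, if_true]


lemma pv_phi_nil (ss0 : List String) (ts0 : List (List String)) : pvPhi ss0 ts0 [] = (ss0, ts0) := by
  simp only [pvPhi, pvNewKeys, pvUpd, pvGet]
  simp [pv_mapIdx_id]


lemma pv_phi_len (ss0 : List String) (ts0 : List (List String)) (L : List (String × List String))
    (hlen : ss0.length = ts0.length) :
    (pvPhi ss0 ts0 L).1.length = (pvPhi ss0 ts0 L).2.length := by
  simp [pvPhi, pvUpd, hlen]


lemma pv_phi_app (ss0 : List String) (ts0 : List (List String)) (L : List (String × List String))
    (k : String) (V : List String) (hk1 : k ∉ ss0) (hk2 : k ∉ L.map Prod.fst) :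
    pvPhi ss0 ts0 (L ++ [(k, V)]) = ((pvPhi ss0 ts0 L).1 ++ [k], (pvPhi ss0 ts0 L).2 ++ [V]) := by
  have hnk : pvNewKeys ss0 (L ++ [(k, V)]) = pvNewKeys ss0 L ++ [k] := by
    simp [pvNewKeys, List.filter_append, hk1]
  have hupd : pvUpd ss0 ts0 (L ++ [(k, V)]) = pvUpd ss0 ts0 L := by
    rw [pvUpd, pvUpd]
    apply pv_mapIdx_congr
    intro i hi
    by_cases hcond : PySem.List.index? ss0 (ss0.getD i "") = some i
    · rw [if_pos hcond, if_pos hcond, pvGet_append_single_of_ne]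
      intro hE
      have hmem : ss0.getD i "" ∈ ss0 := (PySem.List.index?_isSome_iff _ _).1 (by rw [hcond]; rfl)
      exact hk1 (hE ▸ hmem)
    · rw [if_neg hcond, if_neg hcond]
  have hvals : (pvNewKeys ss0 L).map (pvGet (L ++ [(k, V)])) = (pvNewKeys ss0 L).map (pvGet L) := by
    apply List.map_congr_left
    intro k' hk'
    have : k' ∈ L.map Prod.fst := (List.mem_filter.1 hk').1
    have hne : k' ≠ k := fun hE => hk2 (hE ▸ this)
    exact pvGet_append_single_of_ne _ _ _ _ hne
  rw [pvPhi, pvPhi, hnk, hupd]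
  simp only [List.map_append, List.map_cons, List.map_nil]
  rw [pvGet_append_single_self _ _ _ hk2, hvals]
  simp [List.append_assoc]


lemma pv_phi_upd_in (ss0 : List String) (ts0 : List (List String)) (L : List (String × List String))
    (k : String) (V : List String) (i : Nat) (hi : PySem.List.index? ss0 k = some i)
    (_hn : (L.map Prod.fst).Nodup) (hit : i < ts0.length) :
    pvPhi ss0 ts0 (pvIns L k (pvGet L k ++ V))
      = ((pvPhi ss0 ts0 L).1, (pvPhi ss0 ts0 L).2.set i ((pvPhi ss0 ts0 L).2.getD i [] ++ V)) := by
  obtain ⟨hilt, hssi, hfirst⟩ := PySem.List.getElem_of_index?_eq_some hi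
  have hkmem : k ∈ ss0 := by rw [← hssi]; exact List.getElem_mem hilt
  have hnk := pv_ins_newKeys_of_mem ss0 L k (pvGet L k ++ V) hkmem
  have hiu : i < (pvUpd ss0 ts0 L).length := by rw [pv_upd_length]; exact hit
  -- getD of the appended pair at i hits the left part
  have hgd : (pvUpd ss0 ts0 L ++ (pvNewKeys ss0 L).map (pvGet L)).getD i []
      = ts0[i] ++ pvGet L k := by
    rw [List.getD, List.getElem?_append_left hiu, List.getElem?_eq_getElem hiu]
    simp only [Option.getD_some]
    rw [pv_upd_getElem ss0 ts0 L i hit]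
    rw [List.getD_eq_getElem ss0 "" hilt, hssi, if_pos hi]
  have hset : (pvUpd ss0 ts0 L ++ (pvNewKeys ss0 L).map (pvGet L)).set i (ts0[i] ++ pvGet L k ++ V)
      = (pvUpd ss0 ts0 L).set i (ts0[i] ++ pvGet L k ++ V) ++ (pvNewKeys ss0 L).map (pvGet L) :=
    List.set_append_left _ _ hiu
  rw [pvPhi, pvPhi]
  simp only [hnk]
  apply Prod.ext
  · rfl
  · show pvUpd ss0 ts0 (pvIns L k (pvGet L k ++ V)) ++ (pvNewKeys ss0 L).map (pvGet (pvIns L k (pvGet L k ++ V)))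
      = _
    rw [hgd, hset]
    have hA : (pvNewKeys ss0 L).map (pvGet (pvIns L k (pvGet L k ++ V))) = (pvNewKeys ss0 L).map (pvGet L) := by
      apply List.map_congr_left
      intro k' hk'
      have hnm : ¬ ss0.contains k' = true := by
        have := (List.mem_filter.1 hk').2; simpa using this
      have hne : k' ≠ k := fun hE => hnm (by simpa using (hE ▸ hkmem))
      exact pv_ins_get_ne _ _ _ _ hne
    rw [hA]
    congr 1
    apply List.ext_getElem (by simp [pv_upd_length])
    intro j hj1 hj2
    have hjt : j < ts0.length := by simpa [pv_upd_length] using hj1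
    rw [pv_upd_getElem ss0 ts0 _ j hjt, List.getElem_set]
    by_cases hji : i = j
    · subst hji
      rw [if_pos rfl, List.getD_eq_getElem ss0 "" hilt, hssi, if_pos hi, pv_ins_get_self]
      rw [List.append_assoc]
    · rw [if_neg hji]
      rw [pv_upd_getElem ss0 ts0 L j hjt]
      by_cases hcond : PySem.List.index? ss0 (ss0.getD j "") = some j
      · rw [if_pos hcond, if_pos hcond, pv_ins_get_ne]
        intro hE
        rw [hE] at hcond
        rw [hi] at hcond
        exact hji (by injection hcond)
      · rw [if_neg hcond, if_neg hcond]


lemma pv_phi_upd_new (ss0 : List String) (ts0 : List (List String)) (L : List (String × List String))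
    (k : String) (V : List String) (p : Nat) (hk : k ∉ ss0)
    (hp : PySem.List.index? (pvNewKeys ss0 L) k = some p)
    (hn : (L.map Prod.fst).Nodup) (hlen : ss0.length = ts0.length) :
    pvPhi ss0 ts0 (pvIns L k (pvGet L k ++ V))
      = ((pvPhi ss0 ts0 L).1, (pvPhi ss0 ts0 L).2.set (ss0.length + p) ((pvPhi ss0 ts0 L).2.getD (ss0.length + p) [] ++ V)) := by
  obtain ⟨hplt, hnkp, _⟩ := PySem.List.getElem_of_index?_eq_some hp
  have hkmemNK : k ∈ pvNewKeys ss0 L := by rw [← hnkp]; exact List.getElem_mem hplt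
  have hkmemL : k ∈ L.map Prod.fst := (List.mem_filter.1 hkmemNK).1
  have hndNK : (pvNewKeys ss0 L).Nodup := hn.filter _
  -- pvIns takes the in-place-update branch
  have hins : pvIns L k (pvGet L k ++ V) = L.map (fun q => if q.1 == k then (k, pvGet L k ++ V) else q) := by
    rw [pvIns, if_pos (by simpa using hkmemL)]
  have hnkM : pvNewKeys ss0 (pvIns L k (pvGet L k ++ V)) = pvNewKeys ss0 L := by
    rw [hins, pvNewKeys, pvNewKeys, pv_map_fst_updf]
  have hupdM : pvUpd ss0 ts0 (pvIns L k (pvGet L k ++ V)) = pvUpd ss0 ts0 L := by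
    apply pv_upd_ins_of_ne
    intro j hj hE
    have : ss0.getD j "" ∈ ss0 := (PySem.List.index?_isSome_iff _ _).1 (by rw [hj]; rfl)
    exact hk (hE ▸ this)
  have hlU : (pvUpd ss0 ts0 L).length = ss0.length := by rw [pv_upd_length, hlen]
  -- the set/getD at ss0.length + p act on the new-keys part
  have hge : ss0.length + p - (pvUpd ss0 ts0 L).length = p := by rw [hlU]; omega
  have hgd : (pvUpd ss0 ts0 L ++ (pvNewKeys ss0 L).map (pvGet L)).getD (ss0.length + p) []
      = pvGet L k := by
    rw [List.getD, List.getElem?_append_right (by rw [hlU]; omega), hge]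
    have hpm : p < ((pvNewKeys ss0 L).map (pvGet L)).length := by simpa using hplt
    rw [List.getElem?_eq_getElem hpm]
    simp only [Option.getD_some, List.getElem_map]
    rw [hnkp]
  have hset : (pvUpd ss0 ts0 L ++ (pvNewKeys ss0 L).map (pvGet L)).set (ss0.length + p) (pvGet L k ++ V)
      = pvUpd ss0 ts0 L ++ ((pvNewKeys ss0 L).map (pvGet L)).set p (pvGet L k ++ V) := by
    rw [List.set_append_right _ _ (by rw [hlU]; omega), hge]
  rw [pvPhi, pvPhi]
  simp only [hnkM, hupdM]
  apply Prod.ext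
  · rfl
  · show pvUpd ss0 ts0 L ++ (pvNewKeys ss0 L).map (pvGet (pvIns L k (pvGet L k ++ V))) = _
    rw [hgd, hset]
    congr 1
    apply List.ext_getElem (by simp)
    intro j hj1 hj2
    have hjl : j < (pvNewKeys ss0 L).length := by simpa using hj1
    rw [List.getElem_map, List.getElem_set]
    by_cases hjp : p = j
    · subst hjp
      rw [if_pos rfl, hnkp, pv_ins_get_self]
    · rw [if_neg hjp, List.getElem_map]
      apply pv_ins_get_ne
      intro hE
      have hEq : (pvNewKeys ss0 L)[j]'hjl = (pvNewKeys ss0 L)[p]'hplt := by rw [hE, hnkp]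
      exact hjp ((List.Nodup.getElem_inj_iff hndNK).mp hEq).symm


lemma pv_merge_eq_phi (ss0 : List String) (ts0 : List (List String)) :
    ∀ (L : List (String × List String)), (L.map Prod.fst).Nodup →
    (∀ (k : String) (i : Nat), k ∈ L.map Prod.fst → PySem.List.index? ss0 k = some i → i < ts0.length) →
    L.foldl (pvMstep (pvPos ss0)) (ss0, ts0) = pvPhi ss0 ts0 L := by
  intro L
  induction L using List.reverseRecOn with
  | nil => intro _ _; rw [List.foldl_nil, pv_phi_nil]
  | append_singleton L q ih =>
    intro hn hbound
    obtain ⟨k, w⟩ := q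
    rw [List.map_append] at hn
    have hn1 : (L.map Prod.fst).Nodup := hn.of_append_left
    have hk2 : k ∉ L.map Prod.fst := by
      intro hmem
      have := List.disjoint_of_nodup_append hn
      exact this hmem (by simp)
    rw [List.foldl_append, List.foldl_cons, List.foldl_nil,
        ih hn1 (fun k' i' hm h' => hbound k' i' (by simp [hm]) h')]
    rw [pvMstep, pv_pos_get]
    rcases hidx : PySem.List.index? ss0 k with _ | i
    · have hk1 : k ∉ ss0 := (PySem.List.index?_eq_none_iff _ _).1 hidx
      simpa using (pv_phi_app ss0 ts0 L k w hk1 hk2).symm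
    · have h2 := pv_phi_upd_in ss0 ts0 L k w i hidx hn1 (hbound k i (by simp) hidx)
      have hins : pvIns L k (pvGet L k ++ w) = L ++ [(k, w)] := by
        rw [pvIns, if_neg (by simpa using hk2), pvGet_nil_of_not_mem L k hk2, List.nil_append]
      rw [hins] at h2
      simpa using h2.symm

-- a key of the grouped dict comes from an active source token
lemma pv_G_keys_sub (T : List String) : ∀ (S : List String) (d : PySem.Dict String (List String)) (k : String),
    k ∈ (S.foldl (pvGstep T) d).keys → k ∈ d.keys ∨ (k ∈ S ∧ pvV T k ≠ []) := by
  intro S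
  induction S with
  | nil => intro d k h; exact Or.inl h
  | cons sl S ih =>
    intro d k h
    rw [List.foldl_cons] at h
    rcases ih (pvGstep T d sl) k h with h1 | h1
    · rw [pv_gstep_eq] at h1
      by_cases hV : pvV T sl = []
      · rw [if_pos hV] at h1; exact Or.inl h1
      · rw [if_neg hV] at h1
        rcases (PySem.Dict.mem_keys_insert _ _ _ _).1 h1 with h2 | h2
        · exact Or.inr ⟨by simp [h2], h2 ▸ hV⟩
        · exact Or.inl h2
    · exact Or.inr ⟨by simp [h1.1], h1.2⟩

lemma pv_A_eq_phi (T : List String) (ss0 : List String) (ts0 : List (List String))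
    (hlen : ss0.length = ts0.length) (S : List String) :
    S.foldl (pvAstep T) (ss0, ts0) = pvPhi ss0 ts0 ((S.foldl (pvGstep T) PySem.Dict.empty).items) := by
  induction S using List.reverseRecOn with
  | nil => rw [List.foldl_nil, List.foldl_nil]; exact (pv_phi_nil _ _).symm
  | append_singleton S sl ih =>
    rw [List.foldl_append, List.foldl_cons, List.foldl_nil, ih,
        List.foldl_append, List.foldl_cons, List.foldl_nil]
    have hn : (((S.foldl (pvGstep T) PySem.Dict.empty).items).map Prod.fst).Nodup := by
      have := pv_G_keys_nodup T S PySem.Dict.empty (by simp [PySem.Dict.keys, PySem.Dict.empty])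
      simpa [PySem.Dict.keys] using this
    set G := S.foldl (pvGstep T) PySem.Dict.empty with hG
    have hphilen := pv_phi_len ss0 ts0 G.items hlen
    rw [pv_gstep_eq]
    by_cases hV : pvV T sl = []
    · rw [if_pos hV, pv_Astep_noop T _ sl hV]
    · rw [if_neg hV]
      have hitems : (G.insert sl (G.getD sl [] ++ pvV T sl)).items
          = pvIns G.items sl (pvGet G.items sl ++ pvV T sl) := by
        rw [pv_items_insert_eq_pvIns, pv_dict_getD_eq_pvGet]
      rw [hitems]
      by_cases hmem : sl ∈ ss0
      · obtain ⟨i, hidx⟩ : ∃ i, PySem.List.index? ss0 sl = some i :=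
          Option.isSome_iff_exists.1 ((PySem.List.index?_isSome_iff _ _).2 hmem)
        obtain ⟨hilt, _, _⟩ := PySem.List.getElem_of_index?_eq_some hidx
        have hcont : (pvPhi ss0 ts0 G.items).1.contains sl = true := by
          simp [pvPhi]
          exact Or.inl hmem
        have hidxphi : PySem.List.index? (pvPhi ss0 ts0 G.items).1 sl = some i := by
          rw [pvPhi]
          rw [PySem.List.index?_append_of_mem _ hmem, hidx]
        have hbd : (PySem.List.index? (pvPhi ss0 ts0 G.items).1 sl).getD 0
            < (pvPhi ss0 ts0 G.items).2.length := by
          rw [hidxphi]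
          simp only [Option.getD_some, pvPhi]
          rw [List.length_append, pv_upd_length]
          omega
        rw [pv_Astep_mem T _ sl hcont hbd hV, hidxphi]
        simpa using (pv_phi_upd_in ss0 ts0 G.items sl (pvV T sl) i hidx hn (hlen ▸ hilt)).symm
      · by_cases hmemL : sl ∈ G.items.map Prod.fst
        · have hmemNK : sl ∈ pvNewKeys ss0 G.items := by
            rw [pvNewKeys, List.mem_filter]
            exact ⟨hmemL, by simpa using hmem⟩
          obtain ⟨p, hp⟩ : ∃ p, PySem.List.index? (pvNewKeys ss0 G.items) sl = some p :=
            Option.isSome_iff_exists.1 ((PySem.List.index?_isSome_iff _ _).2 hmemNK)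
          obtain ⟨hplt, _, _⟩ := PySem.List.getElem_of_index?_eq_some hp
          have hcont : (pvPhi ss0 ts0 G.items).1.contains sl = true := by
            simp [pvPhi]
            exact Or.inr (by simpa [pvNewKeys, List.mem_filter] using hmemNK)
          have hidxphi : PySem.List.index? (pvPhi ss0 ts0 G.items).1 sl = some (p + ss0.length) := by
            rw [pvPhi]
            rw [pv_index?_append_right ss0 _ sl hmem, hp]
            rfl
          have hbd : (PySem.List.index? (pvPhi ss0 ts0 G.items).1 sl).getD 0
              < (pvPhi ss0 ts0 G.items).2.length := by
            rw [hidxphi]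
            simp only [Option.getD_some, pvPhi]
            rw [List.length_append, pv_upd_length]
            have : p < (pvNewKeys ss0 G.items).length := hplt
            simp only [List.length_map]
            omega
          rw [pv_Astep_mem T _ sl hcont hbd hV, hidxphi]
          have h2 := pv_phi_upd_new ss0 ts0 G.items sl (pvV T sl) p hmem hp hn hlen
          rw [Nat.add_comm ss0.length p] at h2
          simpa using h2.symm
        · have hcont : (pvPhi ss0 ts0 G.items).1.contains sl = false := by
            simp [pvPhi, pvNewKeys]
            refine ⟨hmem, ?_⟩
            intro x hx
            exact absurd (List.mem_map.2 ⟨(sl, x), hx, rfl⟩ : sl ∈ G.items.map Prod.fst) hmemL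
          rw [pv_Astep_new T _ sl hphilen hcont hV]
          have hins2 : pvIns G.items sl (pvGet G.items sl ++ pvV T sl) = G.items ++ [(sl, pvV T sl)] := by
            rw [pvIns, if_neg (by simpa using hmemL), pvGet_nil_of_not_mem _ _ hmemL, List.nil_append]
          rw [hins2]
          simpa using (pv_phi_app ss0 ts0 G.items sl (pvV T sl) hmem hmemL).symm

-- the mismatched-length regime: every active source token is either an in-range existing one
-- or a brand-new one written exactly once
lemma pv_A_eq_phi_mis (T : List String) (ss0 : List String) (ts0 : List (List String)) (S : List String)
    (H : ∀ sl ∈ S, pvV T sl ≠ [] →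
      (sl ∈ ss0 ∧ ∀ i : Nat, PySem.List.index? ss0 sl = some i → i < ts0.length) ∨
      (sl ∉ ss0 ∧ S.count sl = 1 ∧ (pvV T sl).length = 1)) :
    S.foldl (pvAstep T) (ss0, ts0) = pvPhi ss0 ts0 ((S.foldl (pvGstep T) PySem.Dict.empty).items) := by
  induction S using List.reverseRecOn with
  | nil => rw [List.foldl_nil, List.foldl_nil]; exact (pv_phi_nil _ _).symm
  | append_singleton S sl ih =>
    have H' : ∀ x ∈ S, pvV T x ≠ [] →
        (x ∈ ss0 ∧ ∀ i : Nat, PySem.List.index? ss0 x = some i → i < ts0.length) ∨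
        (x ∉ ss0 ∧ S.count x = 1 ∧ (pvV T x).length = 1) := by
      intro x hx hVx
      rcases H x (by simp [hx]) hVx with h | h
      · exact Or.inl h
      · refine Or.inr ⟨h.1, ?_, h.2.2⟩
        have h1 : 1 ≤ S.count x := List.one_le_count_iff.2 hx
        have h2 : S.count x ≤ (S ++ [sl]).count x := by
          rw [List.count_append]; omega
        omega
    rw [List.foldl_append, List.foldl_cons, List.foldl_nil, ih H',
        List.foldl_append, List.foldl_cons, List.foldl_nil]
    have hn : (((S.foldl (pvGstep T) PySem.Dict.empty).items).map Prod.fst).Nodup := by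
      have := pv_G_keys_nodup T S PySem.Dict.empty (by simp [PySem.Dict.keys, PySem.Dict.empty])
      simpa [PySem.Dict.keys] using this
    set G := S.foldl (pvGstep T) PySem.Dict.empty with hG
    rw [pv_gstep_eq]
    by_cases hV : pvV T sl = []
    · rw [if_pos hV, pv_Astep_noop T _ sl hV]
    · rw [if_neg hV]
      have hitems : (G.insert sl (G.getD sl [] ++ pvV T sl)).items
          = pvIns G.items sl (pvGet G.items sl ++ pvV T sl) := by
        rw [pv_items_insert_eq_pvIns, pv_dict_getD_eq_pvGet]
      rw [hitems]
      rcases H sl (by simp) hV with ⟨hmem, hbound⟩ | ⟨hmem, hcount, hVlen⟩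
      · obtain ⟨i, hidx⟩ : ∃ i, PySem.List.index? ss0 sl = some i :=
          Option.isSome_iff_exists.1 ((PySem.List.index?_isSome_iff _ _).2 hmem)
        have hit : i < ts0.length := hbound i hidx
        have hcont : (pvPhi ss0 ts0 G.items).1.contains sl = true := by
          simp [pvPhi]
          exact Or.inl hmem
        have hidxphi : PySem.List.index? (pvPhi ss0 ts0 G.items).1 sl = some i := by
          rw [pvPhi]
          rw [PySem.List.index?_append_of_mem _ hmem, hidx]
        have hbd : (PySem.List.index? (pvPhi ss0 ts0 G.items).1 sl).getD 0
            < (pvPhi ss0 ts0 G.items).2.length := by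
          rw [hidxphi]
          simp only [Option.getD_some, pvPhi]
          rw [List.length_append, pv_upd_length]
          omega
        rw [pv_Astep_mem T _ sl hcont hbd hV, hidxphi]
        simpa using (pv_phi_upd_in ss0 ts0 G.items sl (pvV T sl) i hidx hn hit).symm
      · -- brand-new single-shot source: it cannot already be a key of the grouped dict
        have hmemL : sl ∉ G.items.map Prod.fst := by
          intro hk
          have hkey : sl ∈ G.keys := by simpa [PySem.Dict.keys] using hk
          rcases pv_G_keys_sub T S PySem.Dict.empty sl hkey with h0 | h0
          · simp [PySem.Dict.keys, PySem.Dict.empty] at h0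
          · have h1 : 1 ≤ S.count sl := List.one_le_count_iff.2 h0.1
            have : (S ++ [sl]).count sl = S.count sl + 1 := by
              rw [List.count_append]; simp
            omega
        have hcont : (pvPhi ss0 ts0 G.items).1.contains sl = false := by
          simp [pvPhi, pvNewKeys]
          refine ⟨hmem, ?_⟩
          intro x hx
          exact absurd (List.mem_map.2 ⟨(sl, x), hx, rfl⟩ : sl ∈ G.items.map Prod.fst) hmemL
        obtain ⟨v, hv⟩ : ∃ v, pvV T sl = [v] := by
          rcases hVl : pvV T sl with _ | ⟨v, w⟩
          · exact absurd hVl hV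
          · rw [hVl] at hVlen
            simp at hVlen
            exact ⟨v, by rw [hVlen]⟩
        rw [pv_Astep_single T _ sl v hcont hv]
        have hins2 : pvIns G.items sl (pvGet G.items sl ++ pvV T sl) = G.items ++ [(sl, pvV T sl)] := by
          rw [pvIns, if_neg (by simpa using hmemL), pvGet_nil_of_not_mem _ _ hmemL, List.nil_append]
        rw [hins2, hv]
        simpa [hv] using (pv_phi_app ss0 ts0 G.items sl [v] hmem (by simpa using hmemL)).symm

-- ===== VERDICT (by name: the statement is the Claim_ definition above) =====
theorem add_languages_spec : Claim_equal_add_languages := by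
  intro ss0 ts0 s1 s2 _hDom hPre
  unfold Spec_add_languages
  have hA : add_languages ss0 ts0 s1 s2
      = (PySem.Str.split₀ s1).foldl (pvAstep (PySem.Str.split₀ s2)) (ss0, ts0) := rfl
  have hB : add_languages_alt ss0 ts0 s1 s2
      = ((PySem.Str.split₀ s1).foldl (pvGstep (PySem.Str.split₀ s2)) PySem.Dict.empty).items.foldl
          (pvMstep (pvPos ss0)) (ss0, ts0) := rfl
  have hnd : ((((PySem.Str.split₀ s1).foldl (pvGstep (PySem.Str.split₀ s2)) PySem.Dict.empty).items).map Prod.fst).Nodup := by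
    have := pv_G_keys_nodup (PySem.Str.split₀ s2) (PySem.Str.split₀ s1) PySem.Dict.empty
      (by simp [PySem.Dict.keys, PySem.Dict.empty])
    simpa [PySem.Dict.keys] using this
  rcases hPre with hlen | H
  · rw [hA, hB, pv_A_eq_phi _ _ _ hlen, pv_merge_eq_phi _ _ _ hnd]
    intro k i _ hik
    obtain ⟨hk, _, _⟩ := PySem.List.getElem_of_index?_eq_some hik
    omega
  · have H' : ∀ sl ∈ PySem.Str.split₀ s1, pvV (PySem.Str.split₀ s2) sl ≠ [] →
        (sl ∈ ss0 ∧ ∀ i : Nat, PySem.List.index? ss0 sl = some i → i < ts0.length) ∨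
        (sl ∉ ss0 ∧ (PySem.Str.split₀ s1).count sl = 1 ∧ (pvV (PySem.Str.split₀ s2) sl).length = 1) := by
      intro sl hm hVne
      rcases H sl hm with h | h | h
      · exact absurd h hVne
      · exact Or.inl h
      · exact Or.inr h
    rw [hA, hB, pv_A_eq_phi_mis _ _ _ _ H', pv_merge_eq_phi _ _ _ hnd]
    intro k i hk hik
    have hkey : k ∈ ((PySem.Str.split₀ s1).foldl (pvGstep (PySem.Str.split₀ s2)) PySem.Dict.empty).keys := by
      simpa [PySem.Dict.keys] using hk
    rcases pv_G_keys_sub (PySem.Str.split₀ s2) (PySem.Str.split₀ s1) PySem.Dict.empty k hkey with h0 | h0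
    · simp [PySem.Dict.keys, PySem.Dict.empty] at h0
    · rcases H' k h0.1 h0.2 with h1 | h1
      · exact h1.2 i hik
      · exact absurd ((PySem.List.index?_isSome_iff _ _).1 (by rw [hik]; rfl)) h1.1
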